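-- pv_equiv track=rewrite | github.com/Transi-ent/LeetCode-solver | leetCodeSolver/242.py | validAnagram
-- ===== SOURCE A (Python) =====
-- from collections import Counter
--
-- def validAnagram(s1: str, s2: str):
--
--     if len(s1)!=len(s2):
--         return False
--
--     d = Counter(s1)
--
--     for ch in s2:
--
--         if d.get(ch):
--             d[ch]-=1
--
--         else:
--             return False
--
--         if d[ch]==0:
--             del d[ch]
--
--     return len(d)==0
-- ===== SOURCE B (Python) =====
-- def validAnagram(s1: str, s2: str):
--     return sorted(s1) == sorted(s2)
-- ===== Notes on version B (the rewrite author's own statement) =====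
-- stated objective: idiomatic
-- what changed: Replaces the Counter-build plus per-character decrement/delete loop with a sort-and-compare: sorted(s1) == sorted(s2).
import Mathlib
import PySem

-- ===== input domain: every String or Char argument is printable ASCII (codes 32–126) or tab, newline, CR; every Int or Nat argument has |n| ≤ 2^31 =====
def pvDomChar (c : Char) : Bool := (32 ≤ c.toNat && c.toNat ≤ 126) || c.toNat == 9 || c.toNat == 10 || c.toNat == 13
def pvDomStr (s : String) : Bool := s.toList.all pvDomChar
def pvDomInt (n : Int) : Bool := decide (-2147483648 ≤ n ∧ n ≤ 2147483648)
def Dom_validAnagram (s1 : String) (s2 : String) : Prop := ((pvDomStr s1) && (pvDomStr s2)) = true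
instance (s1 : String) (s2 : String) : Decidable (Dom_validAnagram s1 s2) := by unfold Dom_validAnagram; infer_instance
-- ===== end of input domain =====

-- B replaces A's Counter decrement/delete loop with sorted(s1) == sorted(s2) (idiomatic; same return value).

-- ===== PORT A =====
-- the for-loop over s2 with early 'return False': d is the Counter state
def vaLoop (d : PySem.Dict Char Int) : List Char → Bool
  | [] => d.size == 0                                   -- 'return len(d)==0'
  | ch :: rest =>
    match d.get? ch with                                 -- 'if d.get(ch):' (truthy: present and ≠ 0)
    | none => false                                      -- 'return False'
    | some v =>
      if v == 0 then false                               -- 'return False' (value 0 is falsy)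
      else
        let d1 := d.insert ch (v - 1)                    -- 'd[ch] -= 1'
        let d2 := if d1.getD ch 0 == 0 then d1.erase ch else d1   -- 'if d[ch]==0: del d[ch]'
        vaLoop d2 rest

def validAnagram (s1 : String) (s2 : String) : Bool :=
  if PySem.Str.len s1 != PySem.Str.len s2 then false
  else vaLoop (PySem.Dict.counter s1.toList) s2.toList

-- ===== PORT B =====
def validAnagram_alt (s1 : String) (s2 : String) : Bool :=
  PySem.List.sorted s1.toList (fun x => x) == PySem.List.sorted s2.toList (fun x => x)

-- ===== PRECONDITION & SPEC =====
def Spec_validAnagram (s1 : String) (s2 : String) (out : Bool) : Prop := out = validAnagram_alt s1 s2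
instance (s1 : String) (s2 : String) (out : Bool) : Decidable (Spec_validAnagram s1 s2 out) := by unfold Spec_validAnagram; infer_instance

-- ===== CLAIM (what is proved, stated in full; the proofs are below) =====
def Claim_equal_validAnagram : Prop := ∀ (s1 : String) (s2 : String), Dom_validAnagram s1 s2 → Spec_validAnagram s1 s2 (validAnagram s1 s2)

-- ===== LEMMAS AND PROOFS =====

theorem get?_erase_self {κ ν : Type} [BEq κ] [LawfulBEq κ] (d : PySem.Dict κ ν) (k : κ) :
    (d.erase k).get? k = none := by
  simp [PySem.Dict.erase, PySem.Dict.get?, List.find?_eq_none]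

theorem get?_erase_of_ne {κ ν : Type} [BEq κ] [LawfulBEq κ] (d : PySem.Dict κ ν) (k k' : κ)
    (h : k' ≠ k) : (d.erase k).get? k' = d.get? k' := by
  simp only [PySem.Dict.erase, PySem.Dict.get?]
  congr 1
  induction d.items with
  | nil => rfl
  | cons p rest ih =>
    rw [List.filter_cons]
    by_cases hpk : p.1 = k
    · rw [if_neg (by simp [hpk]), ih, List.find?_cons,
        (by exact beq_eq_false_iff_ne.2 (by rw [hpk]; exact Ne.symm h) : (p.1 == k') = false)]
    · rw [if_pos (by simp [hpk]), List.find?_cons, List.find?_cons]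
      cases hpk' : (p.1 == k') <;> simp [ih]

theorem nodup_keys_erase {κ ν : Type} [BEq κ] (d : PySem.Dict κ ν) (k : κ)
    (h : d.keys.Nodup) : (d.erase k).keys.Nodup := by
  simp only [PySem.Dict.erase, PySem.Dict.keys] at *
  exact h.sublist (List.Sublist.map _ List.filter_sublist)

theorem size_zero_getD (d : PySem.Dict Char Int) (hnd : d.keys.Nodup)
    (hpos : ∀ k v, d.get? k = some v → 0 < v) :
    (d.size == 0) = true ↔ ∀ c : Char, ((0:Int) = d.getD c 0) := by
  constructor
  · intro h c
    have : d.items = [] := by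
      simpa [PySem.Dict.size, List.length_eq_zero_iff] using h
    simp [PySem.Dict.getD, PySem.Dict.get?, this]
  · intro h
    match hitems : d.items with
    | [] => simp [PySem.Dict.size, hitems]
    | (k, v) :: rest =>
      have hmem : (k, v) ∈ d.items := by rw [hitems]; exact List.mem_cons_self
      have hget : d.get? k = some v := PySem.Dict.get?_of_mem_items d hmem hnd
      have hv : 0 < v := hpos k v hget
      have := h k
      rw [PySem.Dict.getD_of_get?_eq_some d 0 hget] at this
      omega

-- main loop invariant: vaLoop succeeds iff d holds exactly the character counts of l
theorem vaLoop_true_iff (l : List Char) (d : PySem.Dict Char Int) (hnd : d.keys.Nodup)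
    (hpos : ∀ k v, d.get? k = some v → 0 < v) :
    vaLoop d l = true ↔ ∀ c : Char, ((l.count c : Int) = d.getD c 0) := by
  induction l generalizing d with
  | nil => simpa [vaLoop] using size_zero_getD d hnd hpos
  | cons ch rest ih =>
    match hget : d.get? ch with
    | none =>
      simp only [vaLoop, hget]
      constructor
      · intro h; exact absurd h (by simp)
      · intro h
        have := h ch
        rw [PySem.Dict.getD_of_get?_eq_none d 0 hget] at this
        rw [List.count_cons_self] at this
        exfalso
        push_cast at this
        omega
    | some v =>
      have hv : 0 < v := hpos ch v hget
      have hvne : (v == 0) = false := by simp; omega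
      have hgetD : d.getD ch 0 = v := PySem.Dict.getD_of_get?_eq_some d 0 hget
      simp only [vaLoop, hget, hvne, Bool.false_eq_true, if_false]
      set d1 := d.insert ch (v - 1) with hd1
      have hd1getD : ∀ c, d1.getD c 0 = if c = ch then v - 1 else d.getD c 0 := by
        intro c; rw [hd1, PySem.Dict.getD_insert]
      set d2 := if d1.getD ch 0 == 0 then d1.erase ch else d1 with hd2
      have hd2getD : ∀ c, d2.getD c 0 = if c = ch then v - 1 else d.getD c 0 := by
        intro c
        rw [hd2]
        by_cases hz : d1.getD ch 0 == 0
        · rw [if_pos hz]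
          by_cases hc : c = ch
          · rw [hc, PySem.Dict.getD_eq_get?_getD, get?_erase_self, if_pos rfl]
            have h1 : d1.getD ch 0 = v - 1 := by rw [hd1getD]; simp
            simp only [beq_iff_eq] at hz
            rw [h1] at hz
            simp [hz]
          · rw [PySem.Dict.getD_eq_get?_getD, get?_erase_of_ne _ _ _ hc,
                ← PySem.Dict.getD_eq_get?_getD, hd1getD, if_neg hc]
        · rw [if_neg hz, hd1getD]
      have hd1nd : d1.keys.Nodup := by
        rw [hd1, PySem.Dict.keys_insert_of_contains]
        · exact hnd
        · rw [PySem.Dict.contains_eq_isSome_get?, hget]; rfl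
      have hd2nd : d2.keys.Nodup := by
        rw [hd2]; split
        · exact nodup_keys_erase _ _ hd1nd
        · exact hd1nd
      have hd2pos : ∀ k w, d2.get? k = some w → 0 < w := by
        intro k w hkw
        by_cases hk : k = ch
        · rw [hd2] at hkw
          by_cases hz : d1.getD ch 0 == 0
          · rw [if_pos hz, hk, get?_erase_self] at hkw
            exact absurd hkw (by simp)
          · rw [if_neg hz] at hkw
            have h1 : d1.getD ch 0 = v - 1 := by rw [hd1getD]; simp
            have h2 : d1.getD k 0 = w := PySem.Dict.getD_of_get?_eq_some d1 0 hkw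
            rw [hk, h1] at h2
            rw [h1] at hz
            simp only [beq_iff_eq] at hz
            omega
        · have hk2 : d2.get? k = d.get? k := by
            rw [hd2]
            by_cases hz : d1.getD ch 0 == 0
            · rw [if_pos hz, get?_erase_of_ne _ _ _ hk, hd1,
                PySem.Dict.get?_insert_of_ne d (v - 1) hk]
            · rw [if_neg hz, hd1, PySem.Dict.get?_insert_of_ne d (v - 1) hk]
          rw [hk2] at hkw
          exact hpos k w hkw
      rw [ih d2 hd2nd hd2pos]
      constructor
      · intro h c
        have hc2 := h c
        rw [hd2getD] at hc2
        by_cases hc : c = ch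
        · subst hc
          rw [if_pos rfl] at hc2
          rw [hgetD, List.count_cons_self]
          push_cast
          omega
        · rw [if_neg hc] at hc2
          rw [List.count_cons_of_ne (Ne.symm hc)]
          exact hc2
      · intro h c
        have hc2 := h c
        rw [hd2getD]
        by_cases hc : c = ch
        · subst hc
          rw [List.count_cons_self, hgetD] at hc2
          rw [if_pos rfl]
          push_cast at hc2
          omega
        · rw [if_neg hc]
          rw [List.count_cons_of_ne (Ne.symm hc)] at hc2
          exact hc2

theorem validAnagram_true_iff (s1 s2 : String) :
    validAnagram s1 s2 = true ↔ s2.toList.Perm s1.toList := by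
  unfold validAnagram
  by_cases hlen : s1.toList.length = s2.toList.length
  · rw [if_neg (by simp [PySem.Str.len_eq, hlen]), vaLoop_true_iff _ _ (PySem.Dict.nodup_keys_counter _)
      (by intro k v h
          have : (PySem.Dict.counter s1.toList).getD k 0 = v :=
            PySem.Dict.getD_of_get?_eq_some _ 0 h
          rw [PySem.Dict.getD_counter] at this
          have hk : k ∈ (PySem.Dict.counter s1.toList).keys := by
            rw [← PySem.Dict.contains_iff_mem_keys, PySem.Dict.contains_eq_isSome_get?, h]; rfl
          rw [PySem.Dict.keys_counter] at hk
          have : 0 < s1.toList.count k := List.count_pos_iff.2 (by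
            simpa [PySem.Set.mem_ofList] using hk)
          omega)]
    constructor
    · intro h
      rw [List.perm_iff_count]
      intro c
      have := h c
      rw [PySem.Dict.getD_counter] at this
      exact_mod_cast this
    · intro h c
      rw [PySem.Dict.getD_counter]
      exact_mod_cast (List.perm_iff_count.1 h) c
  · rw [if_pos (by simp only [bne_iff_ne, ne_eq, PySem.Str.len_eq, Nat.cast_inj]; exact hlen)]
    constructor
    · intro h; exact absurd h (by simp)
    · intro h
      exact absurd h.length_eq.symm hlen

theorem validAnagram_alt_true_iff (s1 s2 : String) :
    validAnagram_alt s1 s2 = true ↔ s1.toList.Perm s2.toList := by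
  unfold validAnagram_alt
  rw [beq_iff_eq, PySem.List.sorted_id_eq_sorted_id_iff_perm]

-- ===== VERDICT (by name: the statement is the Claim_ definition above) =====
theorem validAnagram_spec : Claim_equal_validAnagram := by
  intro s1 s2 _
  unfold Spec_validAnagram
  have h1 := validAnagram_true_iff s1 s2
  have h2 := validAnagram_alt_true_iff s1 s2
  rcases hb : validAnagram_alt s1 s2 with _ | _
  · rcases ha : validAnagram s1 s2 with _ | _
    · rfl
    · rw [ha] at h1; rw [hb] at h2
      exact absurd ((h1.1 rfl).symm) (by simpa using h2)
  · rw [hb] at h2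
    exact h1.2 ((h2.1 rfl).symm)
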